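-- pv_equiv track=rewrite | github.com/1n1styleyuie/Algorithm | Programmers/Lv1/모의고사.py | solution
-- ===== SOURCE A (Python) =====
-- def solution(answers):
--     answer = []
--     # 찍는 방식
--     a = [1, 2, 3, 4, 5]
--     b = [2, 1, 2, 3, 2, 4, 2, 5]
--     c = [3, 3, 1, 1, 2, 2, 4, 4, 5, 5]
--
--     a_cnt = 0
--     b_cnt = 0
--     c_cnt = 0
--
--     # i를 찍는방식의 길이의 나머지로 계산을 하면 찍는 방식을 반복으로 돌리면서 계산이 가능하다.
--     for i in range(len(answers)):
--         if a[i%len(a)] == answers[i]: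
--             a_cnt += 1
--         if b[i%len(b)] == answers[i]:
--             b_cnt += 1
--         if c[i%len(c)] == answers[i]:
--             c_cnt += 1
--
--     # 가장 큰값을 찾고 그 값이 어떤 값인지 찾아서 answer에 저장
--     max_cnt = max(a_cnt, b_cnt, c_cnt)
--     if max_cnt == a_cnt:
--         answer.append(1)
--     if max_cnt == b_cnt:
--         answer.append(2)
--     if max_cnt == c_cnt:
--         answer.append(3)
--     return answer
-- ===== SOURCE B (Python) =====
-- def solution(answers):
--     patterns = [
--         [1, 2, 3, 4, 5],
--         [2, 1, 2, 3, 2, 4, 2, 5],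
--         [3, 3, 1, 1, 2, 2, 4, 4, 5, 5],
--     ]
--     # Score each pattern by residue classes: positions j, j+m, j+2m, ... must all
--     # equal p[j], so the score is the sum over j of how often p[j] occurs in the
--     # strided slice answers[j::m].  No per-element pattern lookup is needed.
--     scores = [
--         sum(answers[j::len(p)].count(v) for j, v in enumerate(p))
--         for p in patterns
--     ]
--     best = max(scores)
--     return [k for k in (1, 2, 3) if scores[k - 1] == best]
-- ===== Notes on version B (the rewrite author's own statement) =====
-- stated objective: alternative
-- what changed: A walks the answers once comparing each element to p[i % len(p)] for three interleaved counters and appends winners via max(); B never compares element-by-element: for each pattern it scores residue classes, summing answers[j::len(p)].count(p[j]) over the pattern's positions, then selects the winning pattern numbers from the score list.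
import Mathlib
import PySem

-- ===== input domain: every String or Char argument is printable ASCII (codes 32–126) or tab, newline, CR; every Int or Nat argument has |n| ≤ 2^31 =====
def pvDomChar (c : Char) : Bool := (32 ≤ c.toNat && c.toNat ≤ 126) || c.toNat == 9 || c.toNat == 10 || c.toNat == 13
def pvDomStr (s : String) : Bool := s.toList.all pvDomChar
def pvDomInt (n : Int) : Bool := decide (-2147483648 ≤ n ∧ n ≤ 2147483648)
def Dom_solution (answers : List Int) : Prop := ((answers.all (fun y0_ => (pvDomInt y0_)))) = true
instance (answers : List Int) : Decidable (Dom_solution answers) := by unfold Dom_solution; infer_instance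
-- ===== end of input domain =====

-- B scores each pattern by residue classes — summing answers[j::len(p)].count(p[j]) over the
-- pattern's positions — instead of A's single index loop comparing every element to
-- p[i % len(p)] for three interleaved counters; objective: alternative (same asymptotic cost).

-- ===== PORT A =====
-- a[i%len(a)] and answers[i] are always in range here, so pyGetD's default 0 is never used.
def solution (answers : List Int) : List Int :=
  let a : List Int := [1, 2, 3, 4, 5]
  let b : List Int := [2, 1, 2, 3, 2, 4, 2, 5]
  let c : List Int := [3, 3, 1, 1, 2, 2, 4, 4, 5, 5]
  let cnts : Int × Int × Int :=
    (PySem.List.pyRange 0 (PySem.List.len answers) 1).foldl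
      (fun (s : Int × Int × Int) i =>
        let s := if PySem.List.pyGetD a (PySem.Int.mod i (PySem.List.len a)) 0
                    = PySem.List.pyGetD answers i 0 then (s.1 + 1, s.2.1, s.2.2) else s
        let s := if PySem.List.pyGetD b (PySem.Int.mod i (PySem.List.len b)) 0
                    = PySem.List.pyGetD answers i 0 then (s.1, s.2.1 + 1, s.2.2) else s
        if PySem.List.pyGetD c (PySem.Int.mod i (PySem.List.len c)) 0
            = PySem.List.pyGetD answers i 0 then (s.1, s.2.1, s.2.2 + 1) else s)
      (0, 0, 0)
  let max_cnt := max cnts.1 (max cnts.2.1 cnts.2.2)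
  let answer : List Int := []
  let answer := if max_cnt = cnts.1 then answer ++ [1] else answer
  let answer := if max_cnt = cnts.2.1 then answer ++ [2] else answer
  if max_cnt = cnts.2.2 then answer ++ [3] else answer

-- ===== PORT B =====
-- sum(answers[j::len(p)].count(v) for j, v in enumerate(p)); len(p) ≠ 0, so the slice's
-- step is never 0 and slice? is always `some` (the .getD [] default is never used).
def pvBscore (answers p : List Int) : Int :=
  ((PySem.List.enumerate p 0).map (fun jv =>
    (PySem.List.count
        ((PySem.List.slice? answers (some jv.1) none (PySem.List.len p)).getD [])
        jv.2 : Int))).sum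

-- scores has three elements, so max?'s `none` (Python's empty-max ValueError) never occurs.
def solution_alt (answers : List Int) : List Int :=
  let patterns : List (List Int) :=
    [[1, 2, 3, 4, 5], [2, 1, 2, 3, 2, 4, 2, 5], [3, 3, 1, 1, 2, 2, 4, 4, 5, 5]]
  let scores := patterns.map (fun p => pvBscore answers p)
  let best := (PySem.List.max? scores id).getD 0
  ([1, 2, 3] : List Int).filter (fun k => PySem.List.pyGetD scores (k - 1) 0 == best)

-- ===== PRECONDITION & SPEC =====
def Spec_solution (answers : List Int) (out : List Int) : Prop := out = solution_alt answers
instance (answers : List Int) (out : List Int) : Decidable (Spec_solution answers out) := by unfold Spec_solution; infer_instance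

-- ===== CLAIM (what is proved, stated in full; the proofs are below) =====
def Claim_equal_solution : Prop := ∀ (answers : List Int), Dom_solution answers → Spec_solution answers (solution answers)

-- ===== LEMMAS AND PROOFS =====

-- closed form of xs[j::m] for 0 ≤ j and 0 < m (the count formula also vanishes when j ≥ len)
lemma pvStrideClosed (xs : List Int) (j m : Nat) (hm : 0 < m) :
    PySem.List.slice? xs (some (j : Int)) none (m : Int)
      = some ((List.range
            ((((xs.length : Int)) - min (j : Int) (xs.length : Int) + m - 1) / m).toNat).filterMap
          (fun (k : Nat) =>
            xs[((min (j : Int) (xs.length : Int)) + (m : Int) * (k : Int)).toNat]?)) := by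
  have hm0 : ¬ ((m : Int) = 0) := by exact_mod_cast hm.ne'
  have hmneg : ¬ ((m : Int) < 0) := by omega
  have hj0 : ¬ ((j : Int) < 0) := by omega
  simp only [PySem.List.slice?, PySem.List.sliceIndices, if_neg hm0, if_neg hmneg, if_neg hj0,
    if_pos (by exact_mod_cast hm : (0 : Int) < m)]
  by_cases hlt : min (j : Int) (xs.length : Int) < (xs.length : Int)
  · rw [if_pos hlt]
  · rw [if_neg hlt]
    have hs : min (j : Int) (xs.length : Int) = (xs.length : Int) := by
      have h1 := min_le_right (j : Int) (xs.length : Int)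
      omega
    have hz : (((xs.length : Int)) - min (j : Int) (xs.length : Int) + m - 1) / m = 0 := by
      rw [hs]
      apply Int.ediv_eq_zero_of_lt <;> omega
    rw [hz]
    simp

-- the strided slice of the empty list is empty
lemma pvStrideNil (j m : Nat) (hm : 0 < m) :
    PySem.List.slice? ([] : List Int) (some (j : Int)) none (m : Int) = some [] := by
  rw [pvStrideClosed [] j m hm]
  simp only [List.length_nil, Nat.cast_zero, Option.some.injEq]
  have hmin : min (j : Int) (0 : Int) = 0 := by omega
  rw [hmin]
  have hz : ((0 : Int) - 0 + m - 1) / m = 0 := by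
    apply Int.ediv_eq_zero_of_lt <;> omega
  rw [hz]
  simp

-- appending one element extends exactly the residue class xs.length % m
lemma pvStrideAppend (xs : List Int) (x : Int) (j m : Nat) (hj : j < m) :
    PySem.List.slice? (xs ++ [x]) (some (j : Int)) none (m : Int)
      = some (((PySem.List.slice? xs (some (j : Int)) none (m : Int)).getD [])
          ++ (if xs.length % m = j then [x] else [])) := by
  have hm : 0 < m := Nat.lt_of_le_of_lt (Nat.zero_le j) hj
  have hm0 : ((m : Int)) ≠ 0 := by exact_mod_cast hm.ne'
  rw [pvStrideClosed (xs ++ [x]) j m hm, pvStrideClosed xs j m hm, Option.getD_some]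
  simp only [Option.some.injEq, List.length_append, List.length_cons, List.length_nil]
  push_cast
  set n := xs.length with hn
  by_cases hj1 : n + 1 ≤ j
  · have e1 : min (j : Int) ((n : Int) + 1) = ((n : Int) + 1) :=
      min_eq_right (by omega)
    have e2 : min (j : Int) (n : Int) = (n : Int) :=
      min_eq_right (by omega)
    have hc' : (((n : Int) + 1) - ((n : Int) + 1) + m - 1) / m = 0 := by
      apply Int.ediv_eq_zero_of_lt <;> omega
    have hc : ((n : Int) - (n : Int) + m - 1) / m = 0 := by
      apply Int.ediv_eq_zero_of_lt <;> omega
    have hif : ¬ (n % m = j) := by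
      have h1 := Nat.mod_le n m
      omega
    rw [e1, e2, hc, hc', if_neg hif]
    simp
  · by_cases hj2 : j = n
    · have e1 : min (j : Int) ((n : Int) + 1) = (j : Int) :=
        min_eq_left (by omega)
      have e2 : min (j : Int) (n : Int) = (n : Int) :=
        min_eq_right (by omega)
      have hc' : (((n : Int) + 1) - (j : Int) + m - 1) / m = 1 := by
        have h1 : ((n : Int) + 1) - (j : Int) + m - 1 = (m : Int) := by omega
        rw [h1, Int.ediv_self hm0]
      have hc : ((n : Int) - (n : Int) + m - 1) / m = 0 := by
        apply Int.ediv_eq_zero_of_lt <;> omega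
      have hif : n % m = j := by
        have h1 : n % m = n := Nat.mod_eq_of_lt (by omega)
        omega
      have hfx : (xs ++ [x])[((j : Int) + (m : Int) * (((0 : Nat) : Nat) : Int)).toNat]?
          = some x := by
        have hidx : ((j : Int) + (m : Int) * (((0 : Nat) : Nat) : Int)).toNat = xs.length := by
          push_cast
          omega
        rw [hidx]
        exact List.getElem?_concat_length
      rw [e1, e2, hc, hc', if_pos hif]
      simp only [Int.toNat_one, Int.toNat_zero, List.range_one, List.range_zero,
        List.filterMap_nil, List.nil_append, List.filterMap_cons]
      rw [hfx]
    · -- j < n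
      have hjn : j < n := by omega
      have e1 : min (j : Int) ((n : Int) + 1) = (j : Int) :=
        min_eq_left (by omega)
      have e2 : min (j : Int) (n : Int) = (j : Int) :=
        min_eq_left (by omega)
      set d : Int := (n : Int) - (j : Int) with hddef
      have hd1 : 1 ≤ d := by omega
      set t : Int := (d - 1) / (m : Int) with htdef
      set r : Int := (d - 1) % (m : Int) with hrdef
      have hdm : (m : Int) * t + r = d - 1 := Int.mul_ediv_add_emod (d - 1) m
      have hr0 : 0 ≤ r := Int.emod_nonneg _ hm0
      have hrm : r < (m : Int) := Int.emod_lt_of_pos _ (by omega)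
      have ht0 : 0 ≤ t := Int.ediv_nonneg (by omega) (by omega)
      have hc : ((n : Int) - (j : Int) + m - 1) / m = t + 1 := by
        have h1 : (n : Int) - (j : Int) + m - 1 = (d - 1) + 1 * (m : Int) := by omega
        rw [h1, Int.add_mul_ediv_right _ _ hm0]
      have hc' : (((n : Int) + 1) - (j : Int) + m - 1) / m = d / (m : Int) + 1 := by
        have h1 : ((n : Int) + 1) - (j : Int) + m - 1 = d + 1 * (m : Int) := by omega
        rw [h1, Int.add_mul_ediv_right _ _ hm0]
      have hT : t = ((t.toNat : Nat) : Int) := (Int.toNat_of_nonneg ht0).symm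
      have hread : ∀ k ∈ List.range (t.toNat + 1),
          (xs ++ [x])[((j : Int) + (m : Int) * (k : Int)).toNat]?
            = xs[((j : Int) + (m : Int) * (k : Int)).toNat]? := by
        intro k hk
        have hk' : (k : Int) ≤ t := by
          have h1 := List.mem_range.mp hk
          omega
        have hmk : (m : Int) * (k : Int) ≤ (m : Int) * t :=
          mul_le_mul_of_nonneg_left hk' (by positivity)
        have hidx : ((j : Int) + (m : Int) * (k : Int)).toNat = j + m * k := by
          have h1 : ((j : Int) + (m : Int) * (k : Int)) = ((j + m * k : Nat) : Int) := by
            push_cast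
            ring
          rw [h1, Int.toNat_natCast]
        have hltn : j + m * k < n := by
          have h1 : ((j + m * k : Nat) : Int) < (n : Int) := by push_cast; omega
          exact_mod_cast h1
        rw [hidx]
        rw [hn] at hltn
        exact List.getElem?_append_left hltn
      by_cases hre : r = (m : Int) - 1
      · have hdm' : d = (m : Int) * (t + 1) := by
          have hexp : (m : Int) * (t + 1) = (m : Int) * t + m := by ring
          omega
        have hdiv : d / (m : Int) = t + 1 := by
          rw [hdm', Int.mul_ediv_cancel_left _ hm0]
        have hmexp : (m : Int) * ((t.toNat + 1 : Nat) : Int) = (m : Int) * t + m := by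
          push_cast
          rw [← hT]
          ring
        have hmod : n % m = j := by
          have hnint : (n : Int) = (j : Int) + (m : Int) * ((t.toNat + 1 : Nat) : Int) := by
            have hexp : (m : Int) * (t + 1) = (m : Int) * t + m := by ring
            omega
          have hnat : n = j + m * (t.toNat + 1) := by exact_mod_cast hnint
          rw [hnat, Nat.add_mul_mod_self_left, Nat.mod_eq_of_lt hj]
        have hT2 : (d / (m : Int) + 1).toNat = t.toNat + 2 := by
          rw [hdiv]
          omega
        have hT1 : (t + 1).toNat = t.toNat + 1 := by omega
        rw [e1, e2, hc, hc', hT2, hT1, if_pos hmod, List.range_succ, List.filterMap_append,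
          List.filterMap_congr hread]
        congr 1
        have hidx2 : ((j : Int) + (m : Int) * ((t.toNat + 1 : Nat) : Int)).toNat = n := by
          have hexp : (m : Int) * (t + 1) = (m : Int) * t + m := by ring
          omega
        simp only [List.filterMap_cons, List.filterMap_nil]
        rw [show (((t.toNat + 1 : Nat) : Int)) = ((t.toNat : Int) + 1) by push_cast; ring] at hidx2
        rw [show ((j : Int) + (m : Int) * (((t.toNat + 1 : Nat)) : Int))
              = ((j : Int) + (m : Int) * ((t.toNat : Int) + 1)) by push_cast; ring]
        rw [hidx2, hn, List.getElem?_concat_length]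
      · have hcm : (m : Int) * t = t * (m : Int) := mul_comm _ _
        have hdiv : d / (m : Int) = t := by
          have hd2 : d = (r + 1) + t * (m : Int) := by omega
          rw [hd2, Int.add_mul_ediv_right _ _ hm0,
            Int.ediv_eq_zero_of_lt (by omega) (by omega), zero_add]
        have hmod : ¬ (n % m = j) := by
          intro hcon
          have h1 : d % (m : Int) = r + 1 := by
            have hd2 : d = (r + 1) + (m : Int) * t := by omega
            rw [hd2, Int.add_mul_emod_self_left, Int.emod_eq_of_lt (by omega) (by omega)]
          have h2 : (n : Int) % (m : Int) = (j : Int) := by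
            have hcast2 := congrArg (fun z : Nat => (z : Int)) hcon
            push_cast at hcast2
            exact hcast2
          have hjm : (j : Int) % (m : Int) = (j : Int) :=
            Int.emod_eq_of_lt (by omega) (by exact_mod_cast hj)
          have h3 : d % (m : Int) = 0 := by
            rw [hddef, Int.sub_emod, h2, hjm]
            simp
          omega
        have hT1 : (t + 1).toNat = t.toNat + 1 := by omega
        rw [e1, e2, hc, hc', hdiv, if_neg hmod, List.append_nil, hT1]
        exact List.filterMap_congr hread

-- members of enumerate p s are (s + j, p[j]) with j < len p
lemma pvEnumMem (p : List Int) (s : Nat) (jv : Int × Int)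
    (h : jv ∈ PySem.List.enumerate p (s : Int)) :
    ∃ jn : Nat, jn < p.length ∧ jv.1 = ((s + jn : Nat) : Int) ∧ jv.2 = p.getD jn 0 := by
  induction p generalizing s jv with
  | nil => simp [PySem.List.enumerate] at h
  | cons q rest ih =>
    rw [PySem.List.enumerate_cons] at h
    rcases List.mem_cons.mp h with h0 | h1
    · exact ⟨0, by simp, by simp [h0], by simp [h0]⟩
    · have hc : ((s : Int) + 1) = ((s + 1 : Nat) : Int) := by push_cast; ring
      rw [hc] at h1
      obtain ⟨jn, hlt, h1', h2'⟩ := ih (s + 1) jv h1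
      refine ⟨jn + 1, by simpa using Nat.succ_lt_succ hlt, ?_, by simpa [List.getD_cons_succ] using h2'⟩
      rw [h1']
      push_cast
      ring

-- a sum of indicators over enumerate vanishes when the index lies before the start
lemma pvIndZero (p : List Int) (s j₀ : Nat) (g : Int → Int) (h : j₀ < s) :
    ((PySem.List.enumerate p (s : Int)).map
      (fun jv => if jv.1 = (j₀ : Int) then g jv.2 else 0)).sum = 0 := by
  induction p generalizing s with
  | nil => simp [PySem.List.enumerate]
  | cons q rest ih =>
    rw [PySem.List.enumerate_cons]
    have hne : ¬ ((s : Int) = (j₀ : Int)) := by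
      intro hcon
      have : s = j₀ := by exact_mod_cast hcon
      omega
    have hc : ((s : Int) + 1) = ((s + 1 : Nat) : Int) := by push_cast; ring
    simp only [List.map_cons, List.sum_cons, if_neg hne]
    rw [hc, ih (s + 1) (by omega)]
    ring

-- a sum of indicators over enumerate collapses to the single matching index
lemma pvInd (p : List Int) (s j₀ : Nat) (g : Int → Int) (h1 : s ≤ j₀) (h2 : j₀ < s + p.length) :
    ((PySem.List.enumerate p (s : Int)).map
      (fun jv => if jv.1 = (j₀ : Int) then g jv.2 else 0)).sum = g (p.getD (j₀ - s) 0) := by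
  induction p generalizing s with
  | nil => simp at h2; omega
  | cons q rest ih =>
    rw [PySem.List.enumerate_cons]
    have hc : ((s : Int) + 1) = ((s + 1 : Nat) : Int) := by push_cast; ring
    by_cases hs : s = j₀
    · subst hs
      simp only [List.map_cons, List.sum_cons]
      rw [hc, pvIndZero rest (s + 1) s g (by omega)]
      simp
    · have hne : ¬ ((s : Int) = (j₀ : Int)) := by
        intro hcon
        exact hs (by exact_mod_cast hcon)
      simp only [List.map_cons, List.sum_cons, if_neg hne]
      rw [hc, ih (s + 1) (by omega) (by simp at h2 ⊢; omega)]
      have hk : j₀ - s = (j₀ - (s + 1)) + 1 := by omega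
      rw [hk, zero_add, List.getD_cons_succ]

-- B's residue-class score equals the per-index match count
lemma pvBscore_eq (xs p : List Int) (hp : 0 < p.length) :
    pvBscore xs p
      = ((PySem.List.pyRange 0 (PySem.List.len xs) 1).countP
          (fun i => decide (PySem.List.pyGetD p (PySem.Int.mod i (PySem.List.len p)) 0
            = PySem.List.pyGetD xs i 0)) : Int) := by
  have hlenp : PySem.List.len p = ((p.length : Nat) : Int) := by simp [pysem]
  induction xs using List.reverseRecOn with
  | nil =>
    have hzero : ∀ jv ∈ PySem.List.enumerate p (0 : Int),
        (PySem.List.count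
            ((PySem.List.slice? [] (some jv.1) none (PySem.List.len p)).getD [])
            jv.2 : Int) = (fun _ : Int × Int => (0 : Int)) jv := by
      intro jv hjv
      obtain ⟨jn, hlt, h1, h2⟩ := pvEnumMem p 0 jv (by simpa using hjv)
      have h1' : jv.1 = ((jn : Nat) : Int) := by simpa using h1
      rw [h1', hlenp, pvStrideNil jn p.length hp]
      simp [PySem.List.count_eq]
    unfold pvBscore
    rw [List.map_eq_map_iff.mpr hzero]
    simp
  | append_singleton xs x ih =>
    have hstep : ∀ jv ∈ PySem.List.enumerate p (0 : Int),
        (PySem.List.count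
            ((PySem.List.slice? (xs ++ [x]) (some jv.1) none (PySem.List.len p)).getD [])
            jv.2 : Int)
          = (fun jv : Int × Int =>
              (PySem.List.count
                ((PySem.List.slice? xs (some jv.1) none (PySem.List.len p)).getD [])
                jv.2 : Int)
              + (if jv.1 = ((xs.length % p.length : Nat) : Int)
                  then (if x == jv.2 then (1 : Int) else 0) else 0)) jv := by
      intro jv hjv
      beta_reduce
      obtain ⟨jn, hlt, h1, h2⟩ := pvEnumMem p 0 jv (by simpa using hjv)
      have h1' : jv.1 = ((jn : Nat) : Int) := by simpa using h1
      rw [h1', hlenp, pvStrideAppend xs x jn p.length hlt, Option.getD_some]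
      simp only [PySem.List.count_eq, List.count_append]
      by_cases hcnd : xs.length % p.length = jn
      · rw [if_pos hcnd,
          if_pos (by exact_mod_cast hcnd.symm :
            ((jn : Nat) : Int) = ((xs.length % p.length : Nat) : Int))]
        push_cast [List.count_cons]
        split_ifs <;> simp
      · rw [if_neg hcnd, if_neg (fun hcon => hcnd (by exact_mod_cast hcon.symm))]
        simp
    unfold pvBscore
    rw [List.map_eq_map_iff.mpr hstep, PySem.List.sum_map_add_int]
    have hsecond :
        (List.map (fun jv : Int × Int =>
            (if jv.1 = ((xs.length % p.length : Nat) : Int)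
              then (if x == jv.2 then (1 : Int) else 0) else 0))
          (PySem.List.enumerate p (0 : Int))).sum
          = (if x == p.getD (xs.length % p.length) 0 then (1 : Int) else 0) := by
      have h := pvInd p 0 (xs.length % p.length) (fun v => if x == v then (1 : Int) else 0)
        (by omega) (by have h2 := Nat.mod_lt xs.length hp; omega)
      simpa using h
    have hfirst :
        (List.map (fun jv : Int × Int =>
            (PySem.List.count
              ((PySem.List.slice? xs (some jv.1) none (PySem.List.len p)).getD [])
              jv.2 : Int))
          (PySem.List.enumerate p (0 : Int))).sum = pvBscore xs p := rfl
    rw [hsecond, hfirst, ih]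
    have hlen2 : PySem.List.len (xs ++ [x]) = ((xs.length : Int)) + 1 := by
      simp [pysem]
    have hlen1 : PySem.List.len xs = ((xs.length : Int)) := by simp [pysem]
    rw [hlen2, hlen1,
      PySem.List.pyRange_one_succ_right (by positivity : (0 : Int) ≤ (xs.length : Int)),
      List.countP_append]
    have hfun : ∀ i ∈ PySem.List.pyRange 0 ((xs.length : Int)) 1,
        (decide (PySem.List.pyGetD p (PySem.Int.mod i (PySem.List.len p)) 0
            = PySem.List.pyGetD (xs ++ [x]) i 0))
          = (decide (PySem.List.pyGetD p (PySem.Int.mod i (PySem.List.len p)) 0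
            = PySem.List.pyGetD xs i 0)) := by
      intro i hi
      have hmem := PySem.List.mem_pyRange_one.mp hi
      have hi' : i = ((i.toNat : Nat) : Int) := by omega
      have hnat : i.toNat < xs.length := by omega
      have hgd : PySem.List.pyGetD (xs ++ [x]) i 0 = PySem.List.pyGetD xs i 0 := by
        rw [hi']
        simp only [PySem.List.pyGetD_natCast, List.getD_eq_getElem?_getD,
          List.getElem?_append_left hnat]
      rw [hgd]
    have hcongr : (PySem.List.pyRange 0 ((xs.length : Int)) 1).countP
          (fun i => decide (PySem.List.pyGetD p (PySem.Int.mod i (PySem.List.len p)) 0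
            = PySem.List.pyGetD (xs ++ [x]) i 0))
        = (PySem.List.pyRange 0 ((xs.length : Int)) 1).countP
          (fun i => decide (PySem.List.pyGetD p (PySem.Int.mod i (PySem.List.len p)) 0
            = PySem.List.pyGetD xs i 0)) := by
      simp only [List.countP_eq_length_filter]
      rw [List.filter_congr hfun]
    have hmodc : PySem.Int.mod ((xs.length : Int)) (PySem.List.len p)
        = ((xs.length % p.length : Nat) : Int) := by
      rw [hlenp]
      exact_mod_cast PySem.Int.mod_natCast xs.length p.length
    have hgd1 : PySem.List.pyGetD p (((xs.length % p.length : Nat) : Int)) 0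
        = p.getD (xs.length % p.length) 0 := by
      simp only [PySem.List.pyGetD_natCast]
    have hgd2 : PySem.List.pyGetD (xs ++ [x]) ((xs.length : Int)) 0 = x := by
      have h1 : ((xs.length : Int)) = ((xs.length : Nat) : Int) := by norm_num
      rw [h1, PySem.List.pyGetD_natCast]
      simp
    have hsing : ([((xs.length : Int))] : List Int).countP
          (fun i => decide (PySem.List.pyGetD p (PySem.Int.mod i (PySem.List.len p)) 0
            = PySem.List.pyGetD (xs ++ [x]) i 0))
        = (if p.getD (xs.length % p.length) 0 = x then 1 else 0) := by
      simp only [List.countP_cons, List.countP_nil, hmodc, hgd1, hgd2, decide_eq_true_eq]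
      split_ifs <;> simp
    rw [hcongr, hsing]
    push_cast
    have hflip : (if x == p.getD (xs.length % p.length) 0 then (1 : Int) else 0)
        = (if p.getD (xs.length % p.length) 0 = x then (1 : Int) else 0) := by
      simp only [beq_iff_eq]
      split_ifs with hA hB
      · rfl
      · exact absurd hA.symm hB
      · exact absurd ‹p.getD (xs.length % p.length) 0 = x›.symm hA
      · rfl
    rw [hflip]

-- one step of one of A's three counters (proof-local shorthand)
def pvCntStep (p answers : List Int) : Int → Int → Int :=
  fun cnt i =>
    if PySem.List.pyGetD p (PySem.Int.mod i (PySem.List.len p)) 0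
        = PySem.List.pyGetD answers i 0 then cnt + 1 else cnt

-- one of A's counters equals B's residue-class score
lemma pvCnt_eq (xs p : List Int) (hp : 0 < p.length) :
    (PySem.List.pyRange 0 (PySem.List.len xs) 1).foldl (pvCntStep p xs) 0 = pvBscore xs p := by
  rw [pvBscore_eq xs p hp]
  unfold pvCntStep
  rw [PySem.List.foldl_ite_add_one
    (fun i => PySem.List.pyGetD p (PySem.Int.mod i (PySem.List.len p)) 0
      = PySem.List.pyGetD xs i 0) _ 0]
  simp

-- A's one fold over a triple of counters is the triple of the three per-counter folds.
lemma pvFoldlTriple (F G H : Int → Int → Int) (l : List Int) (x y z : Int) :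
    l.foldl (fun (s : Int × Int × Int) i => (F s.1 i, G s.2.1 i, H s.2.2 i)) (x, y, z)
      = (l.foldl F x, l.foldl G y, l.foldl H z) := by
  induction l generalizing x y z with
  | nil => rfl
  | cons a t ih => simpa using ih (F x a) (G y a) (H z a)

-- the selection step: A's three conditional appends equal B's filter over [1, 2, 3]
lemma pvSelect (S0 S1 S2 : Int) :
    (let M := max S0 (max S1 S2)
     let ans : List Int := []
     let ans := if M = S0 then ans ++ [1] else ans
     let ans := if M = S1 then ans ++ [2] else ans
     if M = S2 then ans ++ [3] else ans)
    = ([1, 2, 3] : List Int).filter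
        (fun k => PySem.List.pyGetD [S0, S1, S2] (k - 1) 0
          == (PySem.List.max? [S0, S1, S2] id).getD 0) := by
  have hbest : (PySem.List.max? [S0, S1, S2] id).getD 0 = max S0 (max S1 S2) := by
    simp only [PySem.List.max?, List.foldl, id_eq]
    by_cases h01 : S0 < S1 <;> by_cases h02 : S0 < S2 <;> by_cases h12 : S1 < S2 <;>
      simp [h01, h02, h12, max_def] <;> omega
  rw [hbest]
  generalize max S0 (max S1 S2) = M
  have g0 : PySem.List.pyGetD [S0, S1, S2] ((1 : Int) - 1) 0 = S0 := by norm_num [pysem]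
  have g1 : PySem.List.pyGetD [S0, S1, S2] ((2 : Int) - 1) 0 = S1 := by norm_num [pysem]
  have g2 : PySem.List.pyGetD [S0, S1, S2] ((3 : Int) - 1) 0 = S2 := by norm_num [pysem]; rfl
  simp only [List.filter_cons, List.filter_nil, g0, g1, g2]
  split_ifs <;> simp_all

theorem solution_eq_alt (answers : List Int) : solution answers = solution_alt answers := by
  simp only [solution, solution_alt, List.map]
  have hbody :
      (fun (s : Int × Int × Int) i =>
        let s := if PySem.List.pyGetD [(1:Int), 2, 3, 4, 5] (PySem.Int.mod i (PySem.List.len [(1:Int), 2, 3, 4, 5])) 0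
                    = PySem.List.pyGetD answers i 0 then (s.1 + 1, s.2.1, s.2.2) else s
        let s := if PySem.List.pyGetD [(2:Int), 1, 2, 3, 2, 4, 2, 5] (PySem.Int.mod i (PySem.List.len [(2:Int), 1, 2, 3, 2, 4, 2, 5])) 0
                    = PySem.List.pyGetD answers i 0 then (s.1, s.2.1 + 1, s.2.2) else s
        if PySem.List.pyGetD [(3:Int), 3, 1, 1, 2, 2, 4, 4, 5, 5] (PySem.Int.mod i (PySem.List.len [(3:Int), 3, 1, 1, 2, 2, 4, 4, 5, 5])) 0
            = PySem.List.pyGetD answers i 0 then (s.1, s.2.1, s.2.2 + 1) else s)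
      = (fun (s : Int × Int × Int) i =>
          (pvCntStep [1, 2, 3, 4, 5] answers s.1 i,
           pvCntStep [2, 1, 2, 3, 2, 4, 2, 5] answers s.2.1 i,
           pvCntStep [3, 3, 1, 1, 2, 2, 4, 4, 5, 5] answers s.2.2 i)) := by
    funext s i
    obtain ⟨a, b, c⟩ := s
    simp only [pvCntStep]
    split_ifs <;> rfl
  rw [hbody,
    pvFoldlTriple (pvCntStep [1, 2, 3, 4, 5] answers)
      (pvCntStep [2, 1, 2, 3, 2, 4, 2, 5] answers)
      (pvCntStep [3, 3, 1, 1, 2, 2, 4, 4, 5, 5] answers),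
    pvCnt_eq answers [1, 2, 3, 4, 5] (by simp),
    pvCnt_eq answers [2, 1, 2, 3, 2, 4, 2, 5] (by simp),
    pvCnt_eq answers [3, 3, 1, 1, 2, 2, 4, 4, 5, 5] (by simp)]
  simpa using
    pvSelect (pvBscore answers [1, 2, 3, 4, 5]) (pvBscore answers [2, 1, 2, 3, 2, 4, 2, 5])
      (pvBscore answers [3, 3, 1, 1, 2, 2, 4, 4, 5, 5])

-- ===== VERDICT (by name: the statement is the Claim_ definition above) =====
theorem solution_spec : Claim_equal_solution := by
  intro answers _
  unfold Spec_solution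
  exact solution_eq_alt answers
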